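-- pv_equiv track=rewrite | github.com/phil-nox/leetcode | 00_unsorted/925-easy-2566.py | _remapping
-- ===== SOURCE A (Python) =====
-- def _remapping(num: int, target: str, ignore: str) -> int:
--     pre_rlt: list[str] = []
--     replacer: dict[str, str] = dict()
--     for el in str(num):
--         if el is ignore:
--             pre_rlt.append(el)
--             continue
--         if len(replacer) < 1:
--             replacer[el] = target
--         pre_rlt.append(replacer.get(el, el))
--     return int(''.join(pre_rlt))
-- ===== SOURCE B (Python) =====
-- def _remapping(num: int, target: str, ignore: str) -> int:
--     s = str(num)
--     d = next((c for c in s if c is not ignore), '')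
--     return int(s.replace(d, target)) if d else int(s)
-- ===== Notes on version B (the rewrite author's own statement) =====
-- stated objective: simpler
-- what changed: A's single interleaved loop maintaining a list of string pieces plus a one-element dict is replaced by a find-first pass (next over str(num)) followed by one whole-string str.replace.
import Mathlib
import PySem

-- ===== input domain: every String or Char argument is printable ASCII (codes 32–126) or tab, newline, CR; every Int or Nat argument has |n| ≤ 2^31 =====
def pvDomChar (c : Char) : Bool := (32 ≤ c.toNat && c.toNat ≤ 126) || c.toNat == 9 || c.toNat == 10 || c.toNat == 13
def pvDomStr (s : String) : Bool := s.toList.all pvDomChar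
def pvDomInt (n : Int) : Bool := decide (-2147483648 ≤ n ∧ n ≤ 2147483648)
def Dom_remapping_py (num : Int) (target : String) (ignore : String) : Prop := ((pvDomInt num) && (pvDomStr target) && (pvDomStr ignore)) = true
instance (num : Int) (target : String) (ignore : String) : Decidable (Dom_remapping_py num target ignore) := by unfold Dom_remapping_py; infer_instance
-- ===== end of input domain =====

-- B replaces A's interleaved loop + one-element dict by a find-first pass followed by a
-- whole-string str.replace (objective: simpler).


-- ===== PORT A =====
-- Python's `el is ignore` where el is a one-character string drawn from str(num): on the ASCII
-- domain CPython interns all single characters, so identity holds exactly when ignore is the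
-- same one-character string; exact on Dom_.
def pyIsChar (el : Char) (ignore : String) : Bool := ignore.toList == [el]

-- the body of A's `for el in str(num)` loop, acting on the state (pre_rlt, replacer)
def remapStep (target ignore : String) (st : List String × PySem.Dict String String)
    (el : Char) : List String × PySem.Dict String String :=
  if pyIsChar el ignore then (st.1 ++ [String.ofList [el]], st.2)
  else
    let replacer := if st.2.size < 1 then st.2.insert (String.ofList [el]) target else st.2
    (st.1 ++ [replacer.getD (String.ofList [el]) (String.ofList [el])], replacer)

-- int(''.join(pre_rlt)): the ValueError case (ofStr? = none) is excluded by Pre_, .getD 0 is unreachable there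
def remapping_py (num : Int) (target : String) (ignore : String) : Int :=
  (PySem.Int.ofStr? (PySem.Str.join ""
    ((PySem.Int.toChars num).foldl (remapStep target ignore) ([], PySem.Dict.empty)).1)).getD 0

-- ===== PORT B =====
-- d = next((c for c in str(num) if c is not ignore), ''); the match's none arm is the `if d`-false arm
def remapping_py_alt (num : Int) (target : String) (ignore : String) : Int :=
  match (PySem.Int.toStr num).toList.find? (fun c => !pyIsChar c ignore) with
  | some d =>
      (PySem.Int.ofStr? (PySem.Str.replace (PySem.Int.toStr num) (String.ofList [d]) target)).getD 0
  | none => (PySem.Int.ofStr? (PySem.Int.toStr num)).getD 0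

-- ===== PRECONDITION & SPEC =====
-- the digits of str(num) with every copy of its first non-ignored character replaced by target
-- (str(num) itself when every character is ignored)
def remappedChars (num : Int) (target : String) (ignore : String) : List Char :=
  match (PySem.Int.toChars num).find? (fun c => !pyIsChar c ignore) with
  | some d => (PySem.Int.toChars num).flatMap (fun c => if c = d then target.toList else [c])
  | none => PySem.Int.toChars num

-- A raises ValueError exactly when int() rejects the remapped numeral; Pre_ states that it
-- parses — this is the function's whole domain, nothing else is excluded.
def Pre_remapping_py (num : Int) (target : String) (ignore : String) : Prop :=
  (PySem.Int.ofChars? (remappedChars num target ignore)).isSome = true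

instance (num : Int) (target : String) (ignore : String) :
    Decidable (Pre_remapping_py num target ignore) := by
  unfold Pre_remapping_py; infer_instance

def pvWitness_remapping_py : Int × String × String := (-7305, "9", "3")

def Spec_remapping_py (num : Int) (target : String) (ignore : String) (out : Int) : Prop :=
  out = remapping_py_alt num target ignore
instance (num : Int) (target : String) (ignore : String) (out : Int) :
    Decidable (Spec_remapping_py num target ignore out) := by
  unfold Spec_remapping_py; infer_instance

-- ===== CLAIM (what is proved, stated in full; the proofs are below) =====
def Claim_equal_remapping_py : Prop := ∀ (num : Int) (target : String) (ignore : String), Dom_remapping_py num target ignore → Pre_remapping_py num target ignore → Spec_remapping_py num target ignore (remapping_py num target ignore)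

-- ===== LEMMAS AND PROOFS =====

-- str.replace with a one-character pattern maps each character independently
theorem replace_go_singleton (d : Char) (tgt : List Char) :
    ∀ (l acc : List Char) (fuel : Nat), l.length ≤ fuel →
      PySem.Chars.replace.go [d] tgt fuel l acc =
        acc.reverse ++ l.flatMap (fun c => if c = d then tgt else [c]) := by
  intro l
  induction l with
  | nil =>
      intro acc fuel _
      rw [PySem.Chars.replace.go.eq_def]
      cases fuel <;> simp
  | cons c t ih =>
      intro acc fuel hlen
      cases fuel with
      | zero => simp at hlen
      | succ fuel =>
        rw [PySem.Chars.replace.go.eq_def]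
        simp only [List.isPrefixOf, List.flatMap_cons]
        by_cases hc : c = d
        · subst hc
          simp only [beq_self_eq_true, Bool.true_and, if_true, List.length_cons,
            List.length_nil, List.drop_succ_cons, List.drop_zero]
          rw [ih (tgt.reverse ++ acc) fuel (by simp at hlen; omega)]
          simp
        · have hdc : (d == c) = false := by simpa [beq_eq_false_iff_ne] using Ne.symm hc
          simp only [hdc, Bool.false_and, Bool.false_eq_true, if_false]
          rw [ih (c :: acc) fuel (by simp at hlen; omega)]
          simp [hc]

theorem replace_singleton (l : List Char) (d : Char) (tgt : List Char) :
    PySem.Chars.replace l [d] tgt = l.flatMap (fun c => if c = d then tgt else [c]) := by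
  rw [PySem.Chars.replace]
  simp only [List.isEmpty_cons, Bool.false_eq_true, if_false]
  simpa using replace_go_singleton d tgt l [] l.length le_rfl

-- ''.join is concatenation
theorem join_nil_flatten (ls : List (List Char)) :
    PySem.Chars.join [] ls = ls.flatten := by
  induction ls with
  | nil => simp [PySem.Chars.join_nil]
  | cons a rest ih =>
      cases rest with
      | nil => simp [PySem.Chars.join_singleton]
      | cons b r =>
          rw [PySem.Chars.join_cons_cons]
          simp [ih]

-- phase 1 of A's loop: while every character matches ignore, the dict stays empty
theorem fold_phase1 (target ignore : String) :
    ∀ (l : List Char) (pre : List String), (∀ c ∈ l, pyIsChar c ignore = true) →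
      l.foldl (remapStep target ignore) (pre, PySem.Dict.empty) =
        (pre ++ l.map (fun c => String.ofList [c]), PySem.Dict.empty) := by
  intro l
  induction l with
  | nil => intro pre _; simp
  | cons c t ih =>
      intro pre h
      have hc : pyIsChar c ignore = true := h c (by simp)
      simp only [List.foldl_cons, remapStep, hc, if_true]
      rw [ih (pre ++ [String.ofList [c]]) (fun x hx => h x (by simp [hx]))]
      simp

-- phase 2 of A's loop: once the dict holds {d: target}, it never changes again
theorem fold_phase2 (target ignore : String) (d : Char) (hd : pyIsChar d ignore = false) :
    ∀ (l : List Char) (pre : List String),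
      l.foldl (remapStep target ignore)
          (pre, PySem.Dict.empty.insert (String.ofList [d]) target) =
        (pre ++ l.map (fun c => if c = d then target else String.ofList [c]),
          PySem.Dict.empty.insert (String.ofList [d]) target) := by
  intro l
  induction l with
  | nil => intro pre; simp
  | cons c t ih =>
      intro pre
      by_cases hc : pyIsChar c ignore = true
      · have hne : c ≠ d := by intro h; rw [h] at hc; rw [hc] at hd; cases hd
        simp only [List.foldl_cons, remapStep, hc, if_true]
        rw [ih]
        simp [if_neg hne]
      · have hsize : (PySem.Dict.empty.insert (String.ofList [d]) target :
            PySem.Dict String String).size = 1 := by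
          simp [PySem.Dict.insert, PySem.Dict.empty, PySem.Dict.contains, PySem.Dict.size]
        simp only [List.foldl_cons, remapStep, eq_false_of_ne_true hc, Bool.false_eq_true,
          if_false, hsize, Nat.lt_irrefl]
        rw [ih]
        by_cases hcd : c = d
        · subst hcd
          simp [PySem.Dict.insert, PySem.Dict.empty, PySem.Dict.contains, PySem.Dict.getD,
            PySem.Dict.get?_mk_cons]
        · have : (String.ofList [d] == String.ofList [c]) = false := by
            simp only [beq_eq_false_iff_ne, Ne]
            intro h
            exact hcd (by simpa using congrArg String.toList h.symm)
          simp [PySem.Dict.insert, PySem.Dict.empty, PySem.Dict.contains, PySem.Dict.getD,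
            PySem.Dict.get?, this, hcd]

-- the characterwise remap both programs compute, read off as a character list
theorem joined_toList (s : List Char) (f : Char → String) :
    (PySem.Str.join "" (s.map f)).toList = s.flatMap (fun c => (f c).toList) := by
  rw [PySem.Str.toList_join, List.map_map, show ("" : String).toList = [] from rfl,
    join_nil_flatten, ← List.flatMap_def]
  rfl

-- ===== VERDICT (by name: the statement is the Claim_ definition above) =====
theorem remapping_py_spec : Claim_equal_remapping_py := by
  intro num target ignore _ _
  unfold Spec_remapping_py remapping_py remapping_py_alt
  simp only [PySem.Int.toList_toStr]
  cases hfind : (PySem.Int.toChars num).find? (fun c => !pyIsChar c ignore) with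
  | none =>
      rw [List.find?_eq_none] at hfind
      have hall : ∀ c ∈ PySem.Int.toChars num, pyIsChar c ignore = true := by
        intro c hc
        have := hfind c hc
        simpa using this
      rw [fold_phase1 target ignore _ [] hall]
      simp only [List.nil_append]
      have : (PySem.Str.join "" ((PySem.Int.toChars num).map (fun c => String.ofList [c]))).toList
          = PySem.Int.toChars num := by
        rw [joined_toList]
        have : (fun c => (String.ofList [c]).toList) = (fun c : Char => [c]) := by
          funext c; simp
        rw [this]
        simp [List.flatMap_singleton']
      rw [PySem.Int.ofStr?, PySem.Int.ofStr?, this, PySem.Int.toList_toStr]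
  | some d =>
      rw [List.find?_eq_some_iff_append] at hfind
      obtain ⟨hpd, u, v, hs, hu⟩ := hfind
      have hd : pyIsChar d ignore = false := by simpa using hpd
      have hu' : ∀ c ∈ u, pyIsChar c ignore = true := by
        intro c hc; have := hu c hc; simpa using this
      -- run A's fold over u ++ d :: v
      rw [hs, List.foldl_append, fold_phase1 target ignore u [] hu', List.foldl_cons]
      have hstepd : remapStep target ignore
          ([] ++ u.map (fun c => String.ofList [c]), PySem.Dict.empty) d =
          (u.map (fun c => String.ofList [c]) ++ [target],
            PySem.Dict.empty.insert (String.ofList [d]) target) := by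
        simp only [remapStep, hd, Bool.false_eq_true, if_false]
        simp [PySem.Dict.empty, PySem.Dict.size, PySem.Dict.insert, PySem.Dict.contains,
          PySem.Dict.getD, PySem.Dict.get?_mk_cons]
      rw [hstepd, fold_phase2 target ignore d hd]
      -- A's list of pieces is exactly (u ++ d :: v).map f for f c = if c = d then target else ofList [c]
      have hpieces :
          (u.map (fun c => String.ofList [c]) ++ [target]) ++
              v.map (fun c => if c = d then target else String.ofList [c]) =
          (u ++ d :: v).map (fun c => if c = d then target else String.ofList [c]) := by
        have hmapu : u.map (fun c => String.ofList [c]) =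
            u.map (fun c => if c = d then target else String.ofList [c]) := by
          apply List.map_congr_left
          intro c hc
          have hne : c ≠ d := by
            intro h
            have := hu' c hc; rw [h] at this; rw [this] at hd; cases hd
          simp [hne]
        rw [hmapu]
        simp
      simp only [hpieces]
      -- both sides parse the same character list
      have hB : (PySem.Str.replace (PySem.Int.toStr num) (String.ofList [d]) target).toList
          = (u ++ d :: v).flatMap (fun c => if c = d then target.toList else [c]) := by
        rw [PySem.Str.toList_replace, PySem.Int.toList_toStr, hs, String.toList_ofList,
          replace_singleton]
      have hA : (PySem.Str.join ""
            ((u ++ d :: v).map (fun c => if c = d then target else String.ofList [c]))).toList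
          = (u ++ d :: v).flatMap (fun c => if c = d then target.toList else [c]) := by
        rw [joined_toList]
        apply List.flatMap_congr
        intro c _
        by_cases hcd : c = d <;> simp [hcd]
      rw [PySem.Int.ofStr?, PySem.Int.ofStr?, hA, hB]
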